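-- pv_equiv track=rewrite | github.com/mvalentine65/summer_fun | first/first.py | slice_check
-- ===== SOURCE A (Python) =====
-- def slice_check(array, size):
--     if size > len(array)/2 and size != len(array):
--         return False
--     i = size
--     limit = len(array)
--     while i + size <= limit:
--         if array[i:i+size] != array[0:size]:
--             return False
--         i += size
--     return True
-- ===== SOURCE B (Python) =====
-- def slice_check(array, size):
--     if size > len(array)/2 and size != len(array):
--         return False
--     reps = len(array) // size
--     return array[:reps * size] == array[:size] * reps
-- ===== Notes on version B (the rewrite author's own statement) =====
-- stated objective: simpler
-- what changed: Replaces A's while-loop that compares each size-block against the first with a single construction-and-compare: materialise array[:size]*reps (reps = len//size) and compare it with array[:reps*size] in one native sequence equality.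
-- outside the precondition, e.g. on slice_check([1, 2], -1): A returns False, B returns False
import Mathlib
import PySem

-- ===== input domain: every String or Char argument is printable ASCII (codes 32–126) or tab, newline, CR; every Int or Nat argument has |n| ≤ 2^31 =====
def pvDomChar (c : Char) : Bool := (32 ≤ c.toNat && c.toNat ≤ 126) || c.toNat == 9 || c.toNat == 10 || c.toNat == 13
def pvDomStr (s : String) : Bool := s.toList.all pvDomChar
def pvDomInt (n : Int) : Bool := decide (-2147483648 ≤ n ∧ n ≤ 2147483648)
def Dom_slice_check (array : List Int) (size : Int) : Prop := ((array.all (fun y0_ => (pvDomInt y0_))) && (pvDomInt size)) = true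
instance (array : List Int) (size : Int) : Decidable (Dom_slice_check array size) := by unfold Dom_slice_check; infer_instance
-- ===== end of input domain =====

-- B replaces A's block-by-block scanning loop with one construction (block * reps) and one sequence equality: simpler decomposition, same cost.


-- ===== PORT A =====
-- the while loop of A, fueled (with size ≥ 1 the loop runs at most array.length times,
-- so fuel array.length + 1 is exact on Pre_; for size ≤ 0 Python A never terminates)
def sliceLoopA (array : List Int) (size limit : Int) (i : Int) : Nat → Bool
  | 0 => true
  | Nat.succ f =>
      if i + size ≤ limit then
        if PySem.List.slice array (some i) (some (i + size)) ≠
            PySem.List.slice array (some 0) (some size) then false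
        else sliceLoopA array size limit (i + size) f
      else true

def slice_check (array : List Int) (size : Int) : Bool :=
  -- 'size > len(array)/2' on ints within Dom is exactly 2*size > len(array)
  if 2 * size > (array.length : Int) ∧ size ≠ (array.length : Int) then false
  else sliceLoopA array size (array.length : Int) size (array.length + 1)

-- ===== PORT B =====
def slice_check_alt (array : List Int) (size : Int) : Bool :=
  if 2 * size > (array.length : Int) ∧ size ≠ (array.length : Int) then false
  else
    let reps : Int := PySem.Int.floordiv (array.length : Int) size
    -- array[:reps*size] == array[:size] * reps  (list repetition; reps < 0 gives [])
    decide (PySem.List.slice array (some 0) (some (reps * size)) =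
      (List.replicate reps.toNat (PySem.List.slice array (some 0) (some size))).flatten)

-- ===== PRECONDITION & SPEC =====
-- Pre_ excludes size ≤ 0: there Python A loops forever on most inputs (always for size = 0, and for negative size whenever every negative-index slice comparison matches), B raises ZeroDivisionError at size = 0, and the cases where A does return for negative size are accidents of negative slicing.
def Pre_slice_check (array : List Int) (size : Int) : Prop := 1 ≤ size
instance (array : List Int) (size : Int) : Decidable (Pre_slice_check array size) := by unfold Pre_slice_check; infer_instance
def pvWitness_slice_check : List Int × Int := ([1, 2, 1, 2], 2)
def Spec_slice_check (array : List Int) (size : Int) (out : Bool) : Prop := out = slice_check_alt array size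
instance (array : List Int) (size : Int) (out : Bool) : Decidable (Spec_slice_check array size out) := by unfold Spec_slice_check; infer_instance

-- ===== CLAIM (what is proved, stated in full; the proofs are below) =====
def Claim_equal_slice_check : Prop := ∀ (array : List Int) (size : Int), Dom_slice_check array size → Pre_slice_check array size → Spec_slice_check array size (slice_check array size)

-- ===== LEMMAS AND PROOFS =====

-- the loop from i = k*S returns true iff every later full block equals the first block
lemma loopA_iff (array : List Int) (S : Nat) (hS : 1 ≤ S) :
    ∀ (fuel k : Nat), array.length < k * S + fuel * S →
      (sliceLoopA array (S : Int) (array.length : Int) ((k * S : Nat) : Int) fuel = true ↔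
        ∀ j : Nat, k ≤ j → (j + 1) * S ≤ array.length →
          (array.drop (j * S)).take S = array.take S) := by
  intro fuel
  induction fuel with
  | zero =>
      intro k hfuel
      simp only [sliceLoopA, true_iff]
      intro j hk hj
      have h1 : k * S ≤ j * S := Nat.mul_le_mul_right _ hk
      have h2 : j * S + S = (j + 1) * S := by ring
      omega
  | succ f ih =>
      intro k hfuel
      simp only [sliceLoopA]
      have hslice : PySem.List.slice array (some ((k * S : Nat) : Int))
          (some (((k * S : Nat) : Int) + (S : Int))) = (array.drop (k * S)).take S :=
        PySem.List.slice_natCast_add array (k * S) S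
      have hslice0 : PySem.List.slice array (some (0 : Int)) (some ((S : Nat) : Int)) =
          array.take S := by
        simp [PySem.List.slice_zero_start, PySem.List.slice_to_natCast]
      simp only [hslice, hslice0]
      by_cases hle : (k + 1) * S ≤ array.length
      · have hle' : ((k * S : Nat) : Int) + (S : Int) ≤ (array.length : Int) := by
          have h' : k * S + S ≤ array.length := by
            rw [show k * S + S = (k + 1) * S by ring]; exact hle
          exact_mod_cast h'
        rw [if_pos hle']
        by_cases heq : (array.drop (k * S)).take S = array.take S
        · rw [if_neg (by simpa using heq)]
          have hcast : ((k * S : Nat) : Int) + (S : Int) = (((k + 1) * S : Nat) : Int) := by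
            push_cast; ring
          rw [hcast]
          rw [ih (k + 1) (by nlinarith [hfuel])]
          constructor
          · intro h j hk hj
            rcases Nat.eq_or_lt_of_le hk with hk' | hk'
            · rw [← hk']; exact heq
            · exact h j hk' hj
          · intro h j hk hj
            exact h j (by omega) hj
        · rw [if_pos (by simpa using heq)]
          simp only [Bool.false_eq_true, false_iff]
          intro h
          exact heq (h k le_rfl hle)
      · have hcon : ¬ (((k * S : Nat) : Int) + (S : Int) ≤ (array.length : Int)) := by
          intro h
          have h' : k * S + S ≤ array.length := by exact_mod_cast h
          exact hle (by rw [show (k + 1) * S = k * S + S by ring]; exact h')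
        rw [if_neg hcon]
        simp only [true_iff]
        intro j hk hj
        have h1 : (k + 1) * S ≤ (j + 1) * S := Nat.mul_le_mul_right _ (by omega)
        omega

-- the closed form: the first R full blocks concatenated equal block^R iff each block equals the first
lemma closed_iff (array : List Int) (S : Nat) (hS : 1 ≤ S) :
    ∀ (R : Nat), R * S ≤ array.length →
      (array.take (R * S) = (List.replicate R (array.take S)).flatten ↔
        ∀ j : Nat, j < R → (array.drop (j * S)).take S = array.take S) := by
  intro R
  induction R with
  | zero => simp
  | succ R ih =>
      intro hR
      have hRS : R * S ≤ array.length := by nlinarith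
      have hSle : S ≤ array.length := by nlinarith
      have hsplit : array.take ((R + 1) * S) = array.take (R * S) ++ (array.drop (R * S)).take S := by
        rw [show (R + 1) * S = R * S + S by ring, List.take_add]
      have hrep : (List.replicate (R + 1) (array.take S)).flatten =
          (List.replicate R (array.take S)).flatten ++ array.take S := by
        rw [List.replicate_succ', List.flatten_append]; simp
      rw [hsplit, hrep]
      have hlen1 : (array.take (R * S)).length = R * S := by
        simp [List.length_take]; omega
      have hlen2 : ((List.replicate R (array.take S)).flatten).length = R * S := by
        simp [List.length_take, Nat.min_eq_left hSle]
      rw [List.append_eq_append_iff_of_size_eq_left (by omega)]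
      rw [ih hRS]
      constructor
      · rintro ⟨h1, h2⟩ j hj
        rcases Nat.lt_succ_iff_lt_or_eq.mp hj with hj' | hj'
        · exact h1 j hj'
        · rw [hj']; exact h2
      · intro h
        exact ⟨fun j hj => h j (by omega), h R (by omega)⟩

-- ===== VERDICT (by name: the statement is the Claim_ definition above) =====
theorem slice_check_spec : Claim_equal_slice_check := by
  intro array size _ hpre
  unfold Spec_slice_check slice_check slice_check_alt
  by_cases hg : 2 * size > (array.length : Int) ∧ size ≠ (array.length : Int)
  · rw [if_pos hg, if_pos hg]
  · rw [if_neg hg, if_neg hg]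
    have hpre : (1 : Int) ≤ size := hpre
    obtain ⟨S, rfl⟩ : ∃ S : Nat, size = (S : Int) := ⟨size.toNat, (Int.toNat_of_nonneg (by omega)).symm⟩
    have hS : 1 ≤ S := by exact_mod_cast hpre
    have hrep : PySem.Int.floordiv (array.length : Int) (S : Int) =
        ((array.length / S : Nat) : Int) := PySem.Int.floordiv_natCast array.length S
    simp only [hrep]
    set R := array.length / S with hR
    have hmul : ((R : Nat) : Int) * (S : Int) = ((R * S : Nat) : Int) := by push_cast; ring
    rw [hmul, Int.toNat_natCast]
    have hslice0 : PySem.List.slice array (some (0 : Int)) (some ((S : Nat) : Int)) =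
        array.take S := by
      rw [PySem.List.slice_zero_start, PySem.List.slice_to_natCast]
    have hsliceR : PySem.List.slice array (some (0 : Int)) (some ((R * S : Nat) : Int)) =
        array.take (R * S) := by
      rw [PySem.List.slice_zero_start, PySem.List.slice_to_natCast]
    rw [hslice0, hsliceR]
    have hRS : R * S ≤ array.length := Nat.div_mul_le_self array.length S
    -- A's loop starts at i = size = 1 * S
    have hloop := loopA_iff array S hS (array.length + 1) 1
      (by nlinarith [Nat.one_le_iff_ne_zero.mp hS])
    simp only [one_mul] at hloop
    have hclosed := closed_iff array S hS R hRS
    by_cases hall : ∀ j : Nat, j < R → (array.drop (j * S)).take S = array.take S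
    · have hA : sliceLoopA array ((S : Nat) : Int) ((array.length : Nat) : Int)
          ((S : Nat) : Int) (array.length + 1) = true := by
        rw [hloop]
        intro j hj hjn
        have : j + 1 ≤ R := (Nat.le_div_iff_mul_le (by omega)).mpr hjn
        exact hall j (by omega)
      rw [hA]
      exact (decide_eq_true_iff.mpr (hclosed.mpr hall)).symm
    · have hA : ¬ (sliceLoopA array ((S : Nat) : Int) ((array.length : Nat) : Int)
          ((S : Nat) : Int) (array.length + 1) = true) := by
        rw [hloop]
        intro h
        apply hall
        intro j hj
        rcases Nat.eq_zero_or_pos j with hj0 | hj0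
        · subst hj0; simp
        · apply h j hj0
          calc (j + 1) * S ≤ R * S := Nat.mul_le_mul_right _ (by omega)
            _ ≤ array.length := hRS
      rw [Bool.not_eq_true] at hA
      rw [hA]
      exact (decide_eq_false_iff_not.mpr (fun h => hall (hclosed.mp h))).symm
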